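-- pv_equiv track=rewrite | github.com/sudarshan2026-code/Ayuraiveda | facial_region_analysis.py | get_face_bounds
-- ===== SOURCE A (Python) =====
-- from typing import List, Tuple, Dict, Optional
--
-- def get_face_bounds(landmarks: List[Tuple[int, int]]) -> Tuple[int, int, int, int]:
--     """Get full face bounding box"""
--     x_coords = [p[0] for p in landmarks]
--     y_coords = [p[1] for p in landmarks]
--
--     x_min = min(x_coords)
--     y_min = min(y_coords)
--     x_max = max(x_coords)
--     y_max = max(y_coords)
--
--     return (x_min, y_min, x_max, y_max)
-- ===== SOURCE B (Python) =====
-- def get_face_bounds(landmarks):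
--     """Get full face bounding box (single pass with four accumulators)."""
--     it = iter(landmarks)
--     try:
--         x, y = next(it)
--     except StopIteration:
--         raise ValueError("get_face_bounds: empty landmark list")
--     x_min = x_max = x
--     y_min = y_max = y
--     for x, y in it:
--         if x < x_min:
--             x_min = x
--         elif x > x_max:
--             x_max = x
--         if y < y_min:
--             y_min = y
--         elif y > y_max:
--             y_max = y
--     return (x_min, y_min, x_max, y_max)
-- ===== Notes on version B (the rewrite author's own statement) =====
-- stated objective: alternative
-- what changed: B makes a single pass over the landmarks maintaining four extreme accumulators seeded from the first point, instead of A's two list comprehensions followed by four separate min/max reductions.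
import Mathlib
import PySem

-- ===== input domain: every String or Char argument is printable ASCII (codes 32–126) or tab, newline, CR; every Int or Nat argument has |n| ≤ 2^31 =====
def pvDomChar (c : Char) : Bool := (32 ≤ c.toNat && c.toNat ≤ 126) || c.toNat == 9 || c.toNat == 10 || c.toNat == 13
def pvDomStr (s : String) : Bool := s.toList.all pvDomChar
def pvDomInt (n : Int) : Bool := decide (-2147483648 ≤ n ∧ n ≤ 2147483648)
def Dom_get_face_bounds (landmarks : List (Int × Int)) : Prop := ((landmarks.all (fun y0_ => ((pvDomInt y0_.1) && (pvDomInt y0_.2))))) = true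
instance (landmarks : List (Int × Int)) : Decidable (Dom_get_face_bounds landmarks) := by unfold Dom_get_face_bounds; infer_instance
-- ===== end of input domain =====

-- B replaces A's two comprehensions plus four min/max reductions by one pass with four accumulators (alternative decomposition, same cost class).

-- ===== PORT A =====
def get_face_bounds (landmarks : List (Int × Int)) : Int × Int × Int × Int :=
  let x_coords := landmarks.map (fun p => p.1)
  let y_coords := landmarks.map (fun p => p.2)
  let x_min := (PySem.List.min? x_coords (fun v => v)).getD 0
  let y_min := (PySem.List.min? y_coords (fun v => v)).getD 0
  let x_max := (PySem.List.max? x_coords (fun v => v)).getD 0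
  let y_max := (PySem.List.max? y_coords (fun v => v)).getD 0
  (x_min, y_min, x_max, y_max)

-- ===== PORT B =====
-- the for-loop of Source B: if/elif on x, then if/elif on y, updating the four accumulators
def gfbLoop : List (Int × Int) → Int → Int → Int → Int → Int × Int × Int × Int
  | [], x_min, y_min, x_max, y_max => (x_min, y_min, x_max, y_max)
  | (x, y) :: t, x_min, y_min, x_max, y_max =>
      gfbLoop t
        (if x < x_min then x else x_min)
        (if y < y_min then y else y_min)
        (if x < x_min then x_max else if x > x_max then x else x_max)
        (if y < y_min then y_max else if y > y_max then y else y_max)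

def get_face_bounds_alt (landmarks : List (Int × Int)) : Int × Int × Int × Int :=
  match landmarks with
  | [] => (0, 0, 0, 0)   -- Source B raises ValueError here; outside Pre_
  | (x, y) :: t => gfbLoop t x y x y

-- ===== PRECONDITION & SPEC =====
-- Pre_ excludes the empty list, on which both A and B raise ValueError.
def Pre_get_face_bounds (landmarks : List (Int × Int)) : Prop := landmarks ≠ []
instance (landmarks : List (Int × Int)) : Decidable (Pre_get_face_bounds landmarks) := by unfold Pre_get_face_bounds; infer_instance
def pvWitness_get_face_bounds : (List (Int × Int)) := [(1, 2), (3, 0)]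

def Spec_get_face_bounds (landmarks : List (Int × Int)) (out : Int × Int × Int × Int) : Prop := out = get_face_bounds_alt landmarks
instance (landmarks : List (Int × Int)) (out : Int × Int × Int × Int) : Decidable (Spec_get_face_bounds landmarks out) := by unfold Spec_get_face_bounds; infer_instance

-- ===== CLAIM =====
def Claim_equal_get_face_bounds : Prop := ∀ (landmarks : List (Int × Int)), Dom_get_face_bounds landmarks → Pre_get_face_bounds landmarks → Spec_get_face_bounds landmarks (get_face_bounds landmarks)

-- ===== LEMMAS AND PROOFS =====
lemma gfbLoop_eq : ∀ (t : List (Int × Int)) (a b c d : Int), a ≤ c → b ≤ d →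
    gfbLoop t a b c d =
      ((t.map Prod.fst).foldl min a, (t.map Prod.snd).foldl min b,
       (t.map Prod.fst).foldl max c, (t.map Prod.snd).foldl max d)
  | [], a, b, c, d, _, _ => by simp [gfbLoop]
  | (x, y) :: t, a, b, c, d, hac, hbd => by
    have h1 : (if x < a then x else a) = min a x := by rw [min_def]; split_ifs <;> omega
    have h2 : (if y < b then y else b) = min b y := by rw [min_def]; split_ifs <;> omega
    have h3 : (if x < a then c else if x > c then x else c) = max c x := by
      rw [max_def]; split_ifs <;> omega
    have h4 : (if y < b then d else if y > d then y else d) = max d y := by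
      rw [max_def]; split_ifs <;> omega
    have hac' : min a x ≤ max c x := le_trans (min_le_left _ _) (le_trans hac (le_max_left _ _))
    have hbd' : min b y ≤ max d y := le_trans (min_le_left _ _) (le_trans hbd (le_max_left _ _))
    simp only [gfbLoop, h1, h2, h3, h4, List.map_cons, List.foldl_cons]
    exact gfbLoop_eq t _ _ _ _ hac' hbd'

-- ===== VERDICT =====
theorem get_face_bounds_spec : Claim_equal_get_face_bounds := by
  intro landmarks _ hpre
  unfold Spec_get_face_bounds
  cases landmarks with
  | nil => exact absurd rfl hpre
  | cons p t =>
    obtain ⟨x, y⟩ := p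
    simp only [get_face_bounds, get_face_bounds_alt, List.map_cons,
      PySem.List.min?_id_cons, PySem.List.max?_id_cons, Option.getD_some]
    rw [gfbLoop_eq t x y x y le_rfl le_rfl]
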